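-- pv_equiv track=rewrite | github.com/nboley/grit | grit/grit/transcript.py | find_jn_connected_exons
-- ===== SOURCE A (Python) =====
-- from collections import namedtuple, defaultdict
--
-- def find_jn_connected_exons(exons, jns, strand, use_names=False):
--     edges = set()
--
--     # build mappings from exon starts to indices
--     exon_starts_map = defaultdict(list)
--     exon_stops_map = defaultdict(list)
--     for i, (start, stop) in enumerate(exons):
--         exon_starts_map[start].append( i )
--         exon_stops_map[stop].append( i )
--
--     for jn in jns:
--         for start in exon_stops_map[jn[0]-1]:
--             for stop in exon_starts_map[jn[1]+1]:
--                 if use_names: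
--                   if strand == '+':
--                     edges.add((exons[start], exons[stop]))
--                   else:
--                     edges.add((exons[stop], exons[start]))
--                 else:
--                   if strand == '+':
--                     edges.add((start, stop))
--                   else:
--                     edges.add((stop, start))
--
--     return edges
-- ===== SOURCE B (Python) =====
-- def find_jn_connected_exons(exons, jns, strand, use_names=False):
--     edges = set()
--     for jn in jns:
--         stops_here = [i for i, (s, e) in enumerate(exons) if e == jn[0] - 1]
--         starts_here = [j for j, (s, e) in enumerate(exons) if s == jn[1] + 1]
--         for i in stops_here:
--             for j in starts_here:
--                 if use_names:
--                     edges.add((exons[i], exons[j]) if strand == '+' else ((exons[j], exons[i])))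
--                 else:
--                     edges.add((i, j) if strand == '+' else (j, i))
--     return edges
-- ===== Notes on version B (the rewrite author's own statement) =====
-- stated objective: simpler
-- what changed: Dropped the two defaultdict start/stop index maps: for each junction B scans the exon list once to collect matching stop- and start-indices and emits all pairs, keeping the same set semantics.
import Mathlib
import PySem

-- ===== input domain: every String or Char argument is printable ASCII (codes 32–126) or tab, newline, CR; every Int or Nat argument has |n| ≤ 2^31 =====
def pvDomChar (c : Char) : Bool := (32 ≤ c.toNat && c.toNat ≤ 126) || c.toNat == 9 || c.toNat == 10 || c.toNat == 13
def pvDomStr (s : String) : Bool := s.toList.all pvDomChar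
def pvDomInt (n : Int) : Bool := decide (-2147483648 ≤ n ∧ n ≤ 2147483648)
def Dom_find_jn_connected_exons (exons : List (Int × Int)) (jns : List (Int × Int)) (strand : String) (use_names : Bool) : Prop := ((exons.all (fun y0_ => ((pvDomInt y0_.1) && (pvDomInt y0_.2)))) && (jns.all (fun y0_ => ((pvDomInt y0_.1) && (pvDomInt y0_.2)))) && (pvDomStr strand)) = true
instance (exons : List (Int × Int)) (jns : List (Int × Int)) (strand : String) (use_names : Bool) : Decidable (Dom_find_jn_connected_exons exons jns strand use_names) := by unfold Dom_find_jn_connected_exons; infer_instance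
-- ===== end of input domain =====

-- B drops A's two defaultdict index maps and instead rescans the exon list per junction; objective: simpler.

-- ===== PORT A =====
def find_jn_connected_exons (exons : List (Int × Int)) (jns : List (Int × Int)) (strand : String) (use_names : Bool) : List (Int × Int) :=
  -- exon_starts_map / exon_stops_map built in one enumerate loop (defaultdict(list).append = Dict.modify with default [])
  let maps := (PySem.List.enumerate exons).foldl
      (fun (m : PySem.Dict Int (List Int) × PySem.Dict Int (List Int)) p =>
        (m.1.modify p.2.1 [] (· ++ [p.1]), m.2.modify p.2.2 [] (· ++ [p.1])))
      (PySem.Dict.empty, PySem.Dict.empty)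
  jns.foldl (fun edges jn =>
      (maps.2.getD (jn.1 - 1) []).foldl (fun edges start =>
        (maps.1.getD (jn.2 + 1) []).foldl (fun edges stop =>
          if use_names then edges
            -- here Python adds (exons[start], exons[stop]) resp. (exons[stop], exons[start]):
            -- pairs of pairs, not representable in the declared return type; Pre_ excludes such inputs
          else if strand == "+" then PySem.Set.add edges (start, stop)
          else PySem.Set.add edges (stop, start)) edges) edges)
    PySem.Set.empty

-- ===== PORT B =====
def find_jn_connected_exons_alt (exons : List (Int × Int)) (jns : List (Int × Int)) (strand : String) (use_names : Bool) : List (Int × Int) :=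
  jns.foldl (fun edges jn =>
      let stops_here := ((PySem.List.enumerate exons).filter (fun p => p.2.2 == jn.1 - 1)).map (·.1)
      let starts_here := ((PySem.List.enumerate exons).filter (fun p => p.2.1 == jn.2 + 1)).map (·.1)
      stops_here.foldl (fun edges i =>
        starts_here.foldl (fun edges j =>
          if use_names then edges
            -- here Python adds (exons[i], exons[j]) resp. (exons[j], exons[i]):
            -- pairs of pairs, not representable in the declared return type; Pre_ excludes such inputs
          else PySem.Set.add edges (if strand == "+" then (i, j) else (j, i))) edges) edges)
    PySem.Set.empty

-- ===== PRECONDITION & SPEC =====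
-- Pre_ excludes inputs with use_names = true on which some junction actually connects two exons:
-- there A returns a set of pairs of exon PAIRS, a value outside the declared return type
-- List (Int × Int) (B matches A there in Python all the same); with use_names = true and no
-- connecting junction A returns the empty set, which is representable, so those stay inside.
def Pre_find_jn_connected_exons (exons : List (Int × Int)) (jns : List (Int × Int)) (strand : String) (use_names : Bool) : Prop :=
  use_names = false ∨
    ∀ jn ∈ jns, (∀ p ∈ exons, p.2 ≠ jn.1 - 1) ∨ (∀ p ∈ exons, p.1 ≠ jn.2 + 1)
instance (exons : List (Int × Int)) (jns : List (Int × Int)) (strand : String) (use_names : Bool) : Decidable (Pre_find_jn_connected_exons exons jns strand use_names) := by unfold Pre_find_jn_connected_exons; infer_instance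

def pvWitness_find_jn_connected_exons : (List (Int × Int)) × (List (Int × Int)) × String × Bool :=
  ([(1, 2), (4, 5)], [(3, 3)], "+", false)

def Spec_find_jn_connected_exons (exons : List (Int × Int)) (jns : List (Int × Int)) (strand : String) (use_names : Bool) (out : List (Int × Int)) : Prop := out = find_jn_connected_exons_alt exons jns strand use_names
instance (exons : List (Int × Int)) (jns : List (Int × Int)) (strand : String) (use_names : Bool) (out : List (Int × Int)) : Decidable (Spec_find_jn_connected_exons exons jns strand use_names out) := by unfold Spec_find_jn_connected_exons; infer_instance

-- ===== CLAIM (what is proved, stated in full; the proofs are below) =====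
def Claim_equal_find_jn_connected_exons : Prop := ∀ (exons : List (Int × Int)) (jns : List (Int × Int)) (strand : String) (use_names : Bool), Dom_find_jn_connected_exons exons jns strand use_names → Pre_find_jn_connected_exons exons jns strand use_names → Spec_find_jn_connected_exons exons jns strand use_names (find_jn_connected_exons exons jns strand use_names)

-- ===== LEMMAS AND PROOFS =====

-- a grouping fold keyed/valued through functions, looked up at c, is the filtered value list
theorem pv_getD_build (l : List (Int × (Int × Int))) (k v : Int × (Int × Int) → Int) (c : Int) :
    (l.foldl (fun (d : PySem.Dict Int (List Int)) p => d.modify (k p) [] (· ++ [v p])) PySem.Dict.empty).getD c []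
    = ((l.filter (fun p => k p == c)).map v) := by
  have h : l.foldl (fun (d : PySem.Dict Int (List Int)) p => d.modify (k p) [] (· ++ [v p])) PySem.Dict.empty
      = (l.map (fun p => (k p, v p))).foldl (fun d q => d.modify q.1 [] (· ++ [q.2])) PySem.Dict.empty := by
    rw [List.foldl_map]
  rw [h, PySem.Dict.getD_foldl_modify_append, PySem.Dict.getD_empty]
  simp [List.filter_map, Function.comp_def]

theorem pv_getD_stops (exons : List (Int × Int)) (c : Int) :
    (List.foldl (fun (d : PySem.Dict Int (List Int)) p => d.modify p.2.2 [] (· ++ [p.1]))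
      PySem.Dict.empty (PySem.List.enumerate exons)).getD c []
    = ((PySem.List.enumerate exons).filter (fun p => p.2.2 == c)).map (·.1) :=
  pv_getD_build _ _ _ _

theorem pv_getD_starts (exons : List (Int × Int)) (c : Int) :
    (List.foldl (fun (d : PySem.Dict Int (List Int)) p => d.modify p.2.1 [] (· ++ [p.1]))
      PySem.Dict.empty (PySem.List.enumerate exons)).getD c []
    = ((PySem.List.enumerate exons).filter (fun p => p.2.1 == c)).map (·.1) :=
  pv_getD_build _ _ _ _

-- ===== VERDICT (by name: the statement is the Claim_ definition above) =====
theorem find_jn_connected_exons_spec : Claim_equal_find_jn_connected_exons := by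
  intro exons jns strand use_names _ _
  -- on use_names = true both ports add nothing, so they agree without any precondition;
  -- on use_names = false the index-map lookups are the per-junction filters
  unfold Spec_find_jn_connected_exons find_jn_connected_exons find_jn_connected_exons_alt
  by_cases hu : use_names = true
  · subst hu
    simp [List.foldl_fixed]
  have hpre : use_names = false := by revert hu; cases use_names <;> simp
  subst hpre
  simp only [PySem.List.foldl_prod_mk
      (fun (d : PySem.Dict Int (List Int)) (p : Int × (Int × Int)) => d.modify p.2.1 [] (· ++ [p.1]))
      (fun (d : PySem.Dict Int (List Int)) (p : Int × (Int × Int)) => d.modify p.2.2 [] (· ++ [p.1])),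
    pv_getD_stops, pv_getD_starts]
  congr 1
  funext edges jn
  congr 1
  funext e i
  congr 1
  funext e' j
  by_cases hs : strand == "+" <;> simp [hs]
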